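-- pv_equiv track=rewrite | github.com/bdlemos/Faculdade | Curso_Python/Exercício 12 - Kangurus e Subs_ 08_05_23/todo.py | kanguru
-- ===== SOURCE A (Python) =====
-- def kanguru(L):
--     """Mapeia cada numero 'n' em L para '(kan)?(gu)?(ru)?' ou o proprio 'n'
--
--     Exemplos:
--     >>> kanguru([])
--     []
--
--     >>> kanguru([9, 10, 11, 21, 23, 105])
--     ['kan', 'gu', '11', 'kanru', '23', 'kanguru']
--
--     >>> kanguru(range(2, 8))
--     ['2', 'kan', '4', 'gu', 'kan', 'ru']
--
--     >>> kanguru([3, 5, 7, 15, 21, 35, 105, 2])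
--     ['kan', 'gu', 'ru', 'kangu', 'kanru', 'guru', 'kanguru', '2']
--     """
--     #TODO
--     aux = []
--     for i in L:
--         if i % 3 == 0 and i % 5 == 0 and i % 7 == 0:
--             aux += ['kanguru']
--         elif i % 3 == 0 and i % 5 == 0:
--             aux += ['kangu']
--         elif i % 3 == 0 and i % 7 == 0:
--             aux += ['kanru']
--         elif i % 5 == 0 and i % 7 == 0:
--             aux += ['guru']
--         elif i % 3 == 0:
--             aux += ['kan']
--         elif i % 5 == 0:
--             aux += ['gu']
--         elif i % 7 == 0:
--             aux += ['ru']
--         else: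
--             aux+= [str(i)]
--     return aux
-- ===== SOURCE B (Python) =====
-- def kanguru(L):
--     aux = []
--     for i in L:
--         s = ('kan' if i % 3 == 0 else '') + ('gu' if i % 5 == 0 else '') + ('ru' if i % 7 == 0 else '')
--         aux.append(s if s else str(i))
--     return aux
-- ===== Notes on version B (the rewrite author's own statement) =====
-- stated objective: simpler
-- what changed: Replaces the 8-way if/elif chain over divisibility combinations with a single compositional token built by concatenating 'kan'/'gu'/'ru' parts, falling back to str(i) when the token is empty.
import Mathlib
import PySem

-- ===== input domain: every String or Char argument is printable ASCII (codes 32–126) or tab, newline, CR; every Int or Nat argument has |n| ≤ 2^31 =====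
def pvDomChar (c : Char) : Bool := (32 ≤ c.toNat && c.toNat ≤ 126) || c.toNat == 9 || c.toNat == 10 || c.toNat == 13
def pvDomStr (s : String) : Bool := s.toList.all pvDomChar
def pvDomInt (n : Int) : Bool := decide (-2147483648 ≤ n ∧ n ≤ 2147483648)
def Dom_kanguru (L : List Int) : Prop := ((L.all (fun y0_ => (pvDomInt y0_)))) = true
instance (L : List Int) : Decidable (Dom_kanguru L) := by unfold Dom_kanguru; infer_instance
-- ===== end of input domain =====

-- B builds each token compositionally by concatenating 'kan'/'gu'/'ru' parts instead of A's 8-way if/elif chain; objective: simpler.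


-- ===== PORT A =====
-- A's loop body: the 8-branch if/elif chain
def kanguruStep (i : Int) : String :=
  if PySem.Int.mod i 3 = 0 ∧ PySem.Int.mod i 5 = 0 ∧ PySem.Int.mod i 7 = 0 then "kanguru"
  else if PySem.Int.mod i 3 = 0 ∧ PySem.Int.mod i 5 = 0 then "kangu"
  else if PySem.Int.mod i 3 = 0 ∧ PySem.Int.mod i 7 = 0 then "kanru"
  else if PySem.Int.mod i 5 = 0 ∧ PySem.Int.mod i 7 = 0 then "guru"
  else if PySem.Int.mod i 3 = 0 then "kan"
  else if PySem.Int.mod i 5 = 0 then "gu"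
  else if PySem.Int.mod i 7 = 0 then "ru"
  else PySem.Int.toStr i

def kanguru (L : List Int) : List String :=
  L.foldl (fun aux i => aux ++ [kanguruStep i]) []

-- ===== PORT B =====
def kanguru_alt (L : List Int) : List String :=
  L.map (fun i =>
    let s := (if PySem.Int.mod i 3 = 0 then "kan" else "") ++
             (if PySem.Int.mod i 5 = 0 then "gu" else "") ++
             (if PySem.Int.mod i 7 = 0 then "ru" else "")
    if s ≠ "" then s else PySem.Int.toStr i)

-- ===== PRECONDITION & SPEC =====
def Spec_kanguru (L : List Int) (out : List String) : Prop := out = kanguru_alt L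
instance (L : List Int) (out : List String) : Decidable (Spec_kanguru L out) := by unfold Spec_kanguru; infer_instance

-- ===== CLAIM (what is proved, stated in full; the proofs are below) =====
def Claim_equal_kanguru : Prop := ∀ (L : List Int), Dom_kanguru L → Spec_kanguru L (kanguru L)

-- ===== LEMMAS AND PROOFS =====
theorem kanguru_foldl (acc : List String) (L : List Int) :
    L.foldl (fun aux i => aux ++ [kanguruStep i]) acc = acc ++ L.map kanguruStep := by
  induction L generalizing acc with
  | nil => simp
  | cons x xs ih => simp [List.foldl, ih]

theorem kanguruStep_eq (i : Int) :
    kanguruStep i =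
      (let s := (if PySem.Int.mod i 3 = 0 then "kan" else "") ++
                (if PySem.Int.mod i 5 = 0 then "gu" else "") ++
                (if PySem.Int.mod i 7 = 0 then "ru" else "")
       if s ≠ "" then s else PySem.Int.toStr i) := by
  by_cases h3 : (3:Int) ∣ i <;>
  by_cases h5 : (5:Int) ∣ i <;>
  by_cases h7 : (7:Int) ∣ i <;>
  simp [kanguruStep, h3, h5, h7]

-- ===== VERDICT (by name: the statement is the Claim_ definition above) =====
theorem kanguru_spec : Claim_equal_kanguru := by
  intro L _
  unfold Spec_kanguru kanguru kanguru_alt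
  rw [kanguru_foldl]
  simp only [List.nil_append]
  exact List.map_congr_left (fun i _ => kanguruStep_eq i)
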